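-- pv_equiv track=rewrite | github.com/schwichtgit/ai-resume | ingest/ingest.py | extract_failure_chunks
-- ===== SOURCE A (Python) =====
-- def extract_failure_chunks(section_content: str) -> list[dict]:
--     """Extract individual failure stories."""
--     chunks = []
--     current_chunk = None
--     current_content = []
--
--     for line in section_content.split("\n"):
--         # Check for ### Failure heading
--         if line.startswith("### Failure"):
--             # Save previous chunk
--             if current_chunk:
--                 chunks.append({
--                     "title": current_chunk,
--                     "content": "\n".join(current_content).strip(),
--                 })
--             current_chunk = line[4:].strip()
--             current_content = []
--         else:
--             if current_chunk:
--                 current_content.append(line)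
--
--     # Save final chunk
--     if current_chunk:
--         chunks.append({
--             "title": current_chunk,
--             "content": "\n".join(current_content).strip(),
--         })
--
--     return chunks
-- ===== SOURCE B (Python) =====
-- def extract_failure_chunks(section_content: str) -> list[dict]:
--     """Extract individual failure stories: scan heading indices and slice,
--     instead of an accumulate-and-flush state machine."""
--     def is_heading(line):
--         return line.startswith("### Failure")
--
--     lines = section_content.split("\n")
--     n = len(lines)
--     i = 0
--     # drop everything before the first heading
--     while i < n and not is_heading(lines[i]):
--         i += 1
--     chunks = []
--     while i < n:
--         j = i + 1
--         while j < n and not is_heading(lines[j]):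
--             j += 1
--         chunks.append({
--             "title": lines[i][4:].strip(),
--             "content": "\n".join(lines[i + 1:j]).strip(),
--         })
--         i = j
--     return chunks
-- ===== Notes on version B (the rewrite author's own statement) =====
-- stated objective: alternative
-- what changed: Replaces the line-by-line accumulate-and-flush state machine (optional current title, growing content buffer, final flush) with a split-then-map decomposition: skip lines before the first heading, then repeatedly find the next heading boundary and slice out each (heading, body) block directly.
import Mathlib
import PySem

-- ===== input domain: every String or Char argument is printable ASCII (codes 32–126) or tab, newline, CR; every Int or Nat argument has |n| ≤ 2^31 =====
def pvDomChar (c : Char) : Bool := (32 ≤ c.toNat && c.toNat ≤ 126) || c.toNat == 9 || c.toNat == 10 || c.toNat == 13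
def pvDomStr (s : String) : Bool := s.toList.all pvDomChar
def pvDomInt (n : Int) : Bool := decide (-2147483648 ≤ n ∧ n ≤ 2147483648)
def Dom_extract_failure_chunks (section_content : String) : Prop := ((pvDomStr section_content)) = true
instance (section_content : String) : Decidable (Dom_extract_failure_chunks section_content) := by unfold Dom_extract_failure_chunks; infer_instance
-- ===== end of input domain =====

-- B replaces A's accumulate-and-flush line state machine with a split-at-heading-boundaries
-- decomposition (skip the pre-heading prefix, then slice out each heading/body block); same cost.

-- ===== PORT A =====
-- A's chunk dict {"title": t, "content": "\n".join(content).strip()}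
def pvChunkA (t : String) (content : List String) : List (String × String) :=
  [("title", t), ("content", PySem.Str.strip (PySem.Str.join "\n" content))]

-- A's loop body; state = (chunks, current_chunk, current_content); 'if current_chunk:' is
-- Python truthiness: non-None and non-empty.
def pvStepA (st : List (List (String × String)) × Option String × List String)
    (line : String) : List (List (String × String)) × Option String × List String :=
  if PySem.Str.startswith line "### Failure" then
    ((match st.2.1 with
      | some t => if t = "" then st.1 else st.1 ++ [pvChunkA t st.2.2]
      | none => st.1),
     some (PySem.Str.strip (PySem.Str.slice line (some 4) none)), [])
  else
    match st.2.1 with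
    | some t => if t = "" then st else (st.1, some t, st.2.2 ++ [line])
    | none => st

-- A's final 'save final chunk'
def pvFlushA (st : List (List (String × String)) × Option String × List String) :
    List (List (String × String)) :=
  match st.2.1 with
  | some t => if t = "" then st.1 else st.1 ++ [pvChunkA t st.2.2]
  | none => st.1

def extract_failure_chunks (section_content : String) : List (List (String × String)) :=
  pvFlushA (((PySem.Str.split? section_content "\n").getD []).foldl pvStepA ([], none, []))

-- ===== PORT B =====
def pvIsHeading (line : String) : Bool := PySem.Str.startswith line "### Failure"

-- B's first while loop: advance past the lines before the first heading
def pvDropPre : List String → List String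
  | [] => []
  | l :: ls => if pvIsHeading l then l :: ls else pvDropPre ls

-- B's inner while loop: the body slice lines[i+1:j] and the remainder lines[j:]
def pvSpanBody : List String → List String × List String
  | [] => ([], [])
  | l :: ls =>
    if pvIsHeading l then ([], l :: ls)
    else (l :: (pvSpanBody ls).1, (pvSpanBody ls).2)

theorem pvSpanBody_snd_le (ls : List String) : (pvSpanBody ls).2.length ≤ ls.length := by
  induction ls with
  | nil => simp [pvSpanBody]
  | cons l ls ih =>
    simp only [pvSpanBody]
    split
    · simp
    · simpa using Nat.le_succ_of_le ih

-- B's outer while loop: one chunk per heading block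
def pvChunksFrom : List String → List (List (String × String))
  | [] => []
  | h :: rest =>
    [("title", PySem.Str.strip (PySem.Str.slice h (some 4) none)),
     ("content", PySem.Str.strip (PySem.Str.join "\n" (pvSpanBody rest).1))]
    :: pvChunksFrom (pvSpanBody rest).2
termination_by ls => ls.length
decreasing_by simpa using Nat.lt_succ_of_le (pvSpanBody_snd_le rest)

def extract_failure_chunks_alt (section_content : String) : List (List (String × String)) :=
  pvChunksFrom (pvDropPre ((PySem.Str.split? section_content "\n").getD []))

-- ===== PRECONDITION & SPEC =====
def Spec_extract_failure_chunks (section_content : String) (out : List (List (String × String))) : Prop := out = extract_failure_chunks_alt section_content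
instance (section_content : String) (out : List (List (String × String))) : Decidable (Spec_extract_failure_chunks section_content out) := by unfold Spec_extract_failure_chunks; infer_instance

-- ===== CLAIM (what is proved, stated in full; the proofs are below) =====
def Claim_equal_extract_failure_chunks : Prop := ∀ (section_content : String), Dom_extract_failure_chunks section_content → Spec_extract_failure_chunks section_content (extract_failure_chunks section_content)

-- ===== LEMMAS AND PROOFS =====

-- a heading line's stripped title is never "", so A's truthiness test on it always passes
theorem pvTitle_ne (line : String) (h : PySem.Str.startswith line "### Failure" = true) :
    PySem.Str.strip (PySem.Str.slice line (some 4) none) ≠ "" := by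
  intro hc
  have hlist : PySem.Chars.strip (line.toList.drop 4) = [] := by
    have : (PySem.Str.strip (PySem.Str.slice line (some 4) none)).toList = [] := by
      rw [hc]; rfl
    rw [PySem.Str.toList_strip, PySem.Str.toList_slice, PySem.Chars.slice_eq_listSlice,
        PySem.List.slice_from _ (by norm_num)] at this
    simpa using this
  rw [PySem.Str.startswith_eq] at h
  obtain ⟨r, hr⟩ := (PySem.Chars.startswith_iff _ _).mp h
  have hchars : "### Failure".toList = ['#', '#', '#', ' ', 'F', 'a', 'i', 'l', 'u', 'r', 'e'] := by
    decide
  rw [hchars] at hr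
  rw [← hr] at hlist
  have h2 : PySem.Chars.strip ('F' :: ('a' :: 'i' :: 'l' :: 'u' :: 'r' :: 'e' :: r)) = [] := by
    simpa using hlist
  rw [PySem.Chars.strip, PySem.Chars.lstrip, List.dropWhile_cons] at h2
  simp only [show PySem.Chars.isspace 'F' = false from rfl, Bool.false_eq_true, if_false] at h2
  rw [PySem.Chars.rstrip, List.reverse_eq_nil_iff, List.dropWhile_eq_nil_iff] at h2
  exact absurd (h2 'F' (by simp)) (by decide)

-- running A's loop from inside a chunk (title t ≠ "") produces that chunk with the spanned
-- body appended to the pending content, then B's chunks of the remainder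
theorem pvRun_eq (ls : List String) : ∀ (acc : List (List (String × String)))
    (t : String) (c : List String), t ≠ "" →
    pvFlushA (ls.foldl pvStepA (acc, some t, c)) =
      acc ++ pvChunkA t (c ++ (pvSpanBody ls).1) :: pvChunksFrom (pvSpanBody ls).2 := by
  induction ls with
  | nil =>
    intro acc t c ht
    simp [pvFlushA, pvSpanBody, pvChunksFrom, ht]
  | cons l ls ih =>
    intro acc t c ht
    by_cases hl : pvIsHeading l = true
    · have hsw : PySem.Str.startswith l "### Failure" = true := hl
      have ht' := pvTitle_ne l hsw
      simp only [List.foldl_cons, pvStepA, hsw, if_pos, ht]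
      rw [ih _ _ _ ht']
      simp [pvSpanBody, hl, pvChunksFrom, pvChunkA]
    · have hsw : PySem.Str.startswith l "### Failure" = false := by
        simpa [pvIsHeading] using hl
      simp only [List.foldl_cons, pvStepA, hsw, Bool.false_eq_true, if_false, if_neg ht]
      rw [ih _ _ _ ht]
      simp [pvSpanBody, hl, List.append_assoc]

-- before the first heading A's state is inert, matching B's pvDropPre
theorem pvSkip_eq (ls : List String) :
    pvFlushA (ls.foldl pvStepA ([], none, [])) = pvChunksFrom (pvDropPre ls) := by
  induction ls with
  | nil => simp [pvFlushA, pvDropPre, pvChunksFrom]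
  | cons l ls ih =>
    by_cases hl : pvIsHeading l = true
    · have hsw : PySem.Str.startswith l "### Failure" = true := hl
      have ht' := pvTitle_ne l hsw
      simp only [List.foldl_cons, pvStepA, hsw, if_pos]
      rw [pvRun_eq ls [] _ [] ht']
      simp [pvDropPre, hl, pvChunksFrom, pvChunkA]
    · have hsw : PySem.Str.startswith l "### Failure" = false := by
        simpa [pvIsHeading] using hl
      simp only [List.foldl_cons, pvStepA, hsw, Bool.false_eq_true, if_false]
      rw [ih]
      simp [pvDropPre, hl]

-- ===== VERDICT (by name: the statement is the Claim_ definition above) =====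
theorem extract_failure_chunks_spec : Claim_equal_extract_failure_chunks := by
  intro s _
  unfold Spec_extract_failure_chunks extract_failure_chunks extract_failure_chunks_alt
  exact pvSkip_eq _
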